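-- pv_equiv track=rewrite | github.com/starreturns00/apex_stats_v2 | apex_discord_bot_V3.py | find_armory_item
-- ===== SOURCE A (Python) =====
-- def find_armory_item(items, query):
--     query = query.lower().strip()
--     all_items = [i for v in items.values() for i in v]
--     for item in all_items:
--         if item["name"].lower() == query:
--             return item
--     for item in all_items:
--         if query in item["name"].lower():
--             return item
--     return None
-- ===== SOURCE B (Python) =====
-- def find_armory_item(items, query):
--     query = query.lower().strip()
--     fallback = None
--     for item in [i for v in items.values() for i in v]:
--         name = item["name"].lower()
--         if name == query:
--             return item
--         if fallback is None and query in name: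
--             fallback = item
--     return fallback
-- ===== Notes on version B (the rewrite author's own statement) =====
-- stated objective: simpler
-- what changed: Replaces A's two passes over the flattened items (an exact-match pass, then a substring pass) with one pass that returns on the first exact match and remembers the first substring match in a set-once fallback variable returned after the loop.
import Mathlib
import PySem

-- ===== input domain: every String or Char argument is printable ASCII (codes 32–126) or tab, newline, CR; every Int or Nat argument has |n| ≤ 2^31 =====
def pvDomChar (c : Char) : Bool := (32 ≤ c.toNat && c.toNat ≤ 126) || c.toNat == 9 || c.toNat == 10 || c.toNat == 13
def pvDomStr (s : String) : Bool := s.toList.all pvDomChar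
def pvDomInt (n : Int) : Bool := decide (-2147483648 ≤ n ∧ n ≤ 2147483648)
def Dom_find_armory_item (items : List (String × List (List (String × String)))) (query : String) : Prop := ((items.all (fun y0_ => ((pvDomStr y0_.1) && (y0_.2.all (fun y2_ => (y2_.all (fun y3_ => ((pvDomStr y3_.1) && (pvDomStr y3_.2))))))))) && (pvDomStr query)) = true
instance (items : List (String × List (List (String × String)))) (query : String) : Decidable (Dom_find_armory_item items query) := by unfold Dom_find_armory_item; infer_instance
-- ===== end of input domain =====

-- B does one pass (return first exact match immediately, remember the first substring
-- match in a set-once fallback) instead of A's flattened-list two-pass scan.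

-- ===== PORT A =====
-- item["name"] (under Pre_ the key is present; getD "" is exact there)
def pvName (item : List (String × String)) : String :=
  (PySem.Dict.mk item).getD "name" ""

def find_armory_item (items : List (String × List (List (String × String)))) (query : String) : Option (List (String × String)) :=
  let q := PySem.Str.strip (PySem.Str.lower query)
  let all_items := ((PySem.Dict.mk items).values).flatMap (fun v => v)
  match all_items.find? (fun item => PySem.Str.lower (pvName item) == q) with
  | some item => some item
  | none => all_items.find? (fun item => PySem.Str.isIn q (PySem.Str.lower (pvName item)))

-- ===== PORT B =====
-- the single loop of Source B, with `fallback` as the accumulator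
def pvAltLoop (q : String) : List (List (String × String)) → Option (List (String × String)) → Option (List (String × String))
  | [], fallback => fallback
  | item :: rest, fallback =>
      let name := PySem.Str.lower (pvName item)
      if name == q then some item
      else pvAltLoop q rest
        (if fallback.isNone && PySem.Str.isIn q name then some item else fallback)

def find_armory_item_alt (items : List (String × List (List (String × String)))) (query : String) : Option (List (String × String)) :=
  let q := PySem.Str.strip (PySem.Str.lower query)
  pvAltLoop q (((PySem.Dict.mk items).values).flatMap (fun v => v)) none

-- ===== PRECONDITION & SPEC =====
-- Pre_ excludes exactly the inputs on which Python A raises KeyError: some item dict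
-- lacking the key "name" is reached, i.e. occurs before any exact-matching item.
def Pre_find_armory_item (items : List (String × List (List (String × String)))) (query : String) : Prop :=
  let q := PySem.Str.strip (PySem.Str.lower query)
  let all := ((PySem.Dict.mk items).values).flatMap (fun v => v)
  ∀ j : Fin all.length, (PySem.Dict.mk (all.get j)).contains "name" = false →
    ∃ i : Fin all.length, i.val < j.val ∧ PySem.Str.lower (pvName (all.get i)) = q
instance (items : List (String × List (List (String × String)))) (query : String) : Decidable (Pre_find_armory_item items query) := by unfold Pre_find_armory_item; infer_instance

def pvWitness_find_armory_item : (List (String × List (List (String × String)))) × String :=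
  ([("weapons", [[("name", "Axe")], [("name", "Longbow")]])], " AXE ")

def Spec_find_armory_item (items : List (String × List (List (String × String)))) (query : String) (out : Option (List (String × String))) : Prop := out = find_armory_item_alt items query
instance (items : List (String × List (List (String × String)))) (query : String) (out : Option (List (String × String))) : Decidable (Spec_find_armory_item items query out) := by unfold Spec_find_armory_item; infer_instance

-- ===== CLAIM (what is proved, stated in full; the proofs are below) =====
def Claim_equal_find_armory_item : Prop := ∀ (items : List (String × List (List (String × String)))) (query : String), Dom_find_armory_item items query → Pre_find_armory_item items query → Spec_find_armory_item items query (find_armory_item items query)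

-- ===== LEMMAS AND PROOFS =====

-- the single pass equals: first exact match, else the fallback, else the first substring match
theorem pvAltLoop_eq (q : String) (l : List (List (String × String)))
    (fb : Option (List (String × String))) :
    pvAltLoop q l fb =
      match l.find? (fun item => PySem.Str.lower (pvName item) == q) with
      | some x => some x
      | none =>
          match fb with
          | some y => some y
          | none => l.find? (fun item => PySem.Str.isIn q (PySem.Str.lower (pvName item))) := by
  induction l generalizing fb with
  | nil => cases fb <;> simp [pvAltLoop]
  | cons item rest ih =>
      simp only [pvAltLoop, List.find?]
      by_cases he : (PySem.Str.lower (pvName item) == q) = true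
      · simp [he]
      · rw [if_neg he, ih]
        simp only [he]
        cases fb with
        | some y => simp
        | none =>
            by_cases hs : PySem.Chars.isIn q.toList (PySem.Chars.lower (pvName item).toList) = true
            · simp [hs]
            · simp [hs]

-- ===== VERDICT (by name: the statement is the Claim_ definition above) =====
theorem find_armory_item_spec : Claim_equal_find_armory_item := by
  intro items query _ _
  unfold Spec_find_armory_item find_armory_item find_armory_item_alt
  rw [pvAltLoop_eq]
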